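-- pv_equiv track=rewrite | github.com/tomkrikorian/BlenderToRCP | Plugin/export/materials/textures.py | _texture_node_id_from_nodedef
-- ===== SOURCE A (Python) =====
-- def _texture_node_id_from_nodedef(nodedef_name: str) -> str:
--     """Convert a nodedef name to a node id (strip ND_ and type suffix)."""
--     if nodedef_name.startswith("ND_"):
--         base = nodedef_name[3:]
--     else:
--         base = nodedef_name
--
--     for suffix in ("_color3", "_color4", "_vector2", "_vector3", "_vector4", "_float"):
--         if base.endswith(suffix):
--             return base[: -len(suffix)]
--     return base
-- ===== SOURCE B (Python) =====
-- _SUFFIX_TOKENS = {"color3", "color4", "vector2", "vector3", "vector4", "float"}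
--
--
-- def _texture_node_id_from_nodedef(nodedef_name: str) -> str:
--     """Convert a nodedef name to a node id (strip ND_ and type suffix)."""
--     base = nodedef_name.removeprefix("ND_")
--     stem, sep, last = base.rpartition("_")
--     if sep and last in _SUFFIX_TOKENS:
--         return stem
--     return base
-- ===== Notes on version B (the rewrite author's own statement) =====
-- stated objective: idiomatic
-- what changed: Replaces the per-suffix endswith loop (and manual ND_ check/slice) with removeprefix, one rpartition at the last underscore, and a single set-membership test of the trailing token.
import Mathlib
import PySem

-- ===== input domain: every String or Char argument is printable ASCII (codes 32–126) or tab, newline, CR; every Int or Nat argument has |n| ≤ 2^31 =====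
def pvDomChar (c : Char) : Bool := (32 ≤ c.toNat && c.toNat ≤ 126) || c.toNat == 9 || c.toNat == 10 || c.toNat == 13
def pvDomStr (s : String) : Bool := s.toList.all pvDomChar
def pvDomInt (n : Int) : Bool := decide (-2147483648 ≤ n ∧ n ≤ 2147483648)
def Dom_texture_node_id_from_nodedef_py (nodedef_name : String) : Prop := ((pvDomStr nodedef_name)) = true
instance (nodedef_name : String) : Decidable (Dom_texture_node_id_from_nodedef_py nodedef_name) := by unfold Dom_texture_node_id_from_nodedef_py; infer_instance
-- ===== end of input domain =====

-- B replaces A's per-suffix endswith loop by one rpartition at the last underscore plus a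
-- single set-membership test of the trailing token (objective: idiomatic).

-- ===== PORT A =====
-- A's 'for suffix in (...)' loop: return base[:-len(suffix)] at the first matching suffix
def pyASuffixLoop (base : String) : List String → String
  | [] => base
  | s :: rest =>
    if PySem.Str.endswith base s then
      String.ofList (PySem.List.slice base.toList none (some (-(s.length : Int))))
    else pyASuffixLoop base rest

def texture_node_id_from_nodedef_py (nodedef_name : String) : String :=
  let base :=
    if PySem.Str.startswith nodedef_name "ND_" then
      String.ofList (PySem.List.slice nodedef_name.toList (some (3 : Int)) none)
    else nodedef_name
  pyASuffixLoop base ["_color3", "_color4", "_vector2", "_vector3", "_vector4", "_float"]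

-- ===== PORT B =====
-- hand port of base.rpartition("_"): split at the LAST '_' (exact: scan the reversed chars);
-- returns (stem, last token, sep-found?)
def pyRPartitionUnderscore (l : List Char) : List Char × List Char × Bool :=
  match l.reverse.dropWhile (· ≠ '_') with
  | [] => ([], l, false)
  | _ :: rest => (rest.reverse, (l.reverse.takeWhile (· ≠ '_')).reverse, true)

def pySuffixTokens : List String := PySem.Set.ofList ["color3", "color4", "vector2", "vector3", "vector4", "float"]

def texture_node_id_from_nodedef_py_alt (nodedef_name : String) : String :=
  let base :=
    if PySem.Str.startswith nodedef_name "ND_" then String.ofList (nodedef_name.toList.drop 3)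
    else nodedef_name
  let p := pyRPartitionUnderscore base.toList
  if p.2.2 && pySuffixTokens.contains (String.ofList p.2.1) then String.ofList p.1 else base

-- ===== PRECONDITION & SPEC =====
def Spec_texture_node_id_from_nodedef_py (nodedef_name : String) (out : String) : Prop := out = texture_node_id_from_nodedef_py_alt nodedef_name
instance (nodedef_name : String) (out : String) : Decidable (Spec_texture_node_id_from_nodedef_py nodedef_name out) := by unfold Spec_texture_node_id_from_nodedef_py; infer_instance

-- ===== CLAIM (what is proved, stated in full; the proofs are below) =====
def Claim_equal_texture_node_id_from_nodedef_py : Prop := ∀ (nodedef_name : String), Dom_texture_node_id_from_nodedef_py nodedef_name → Spec_texture_node_id_from_nodedef_py nodedef_name (texture_node_id_from_nodedef_py nodedef_name)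

-- ===== LEMMAS AND PROOFS =====

theorem tnid_ofList_eq_iff (a : List Char) (s : String) : String.ofList a = s ↔ a = s.toList :=
  ⟨fun h => by simpa using congrArg String.toList h, fun h => by simp [h]⟩

-- takeWhile/dropWhile split around the first '_'
theorem tnid_tdw (a b : List Char) (ha : ∀ c ∈ a, c ≠ '_') :
    (a ++ '_' :: b).takeWhile (· ≠ '_') = a ∧ (a ++ '_' :: b).dropWhile (· ≠ '_') = '_' :: b := by
  induction a with
  | nil => simp
  | cons x xs ih =>
    have hx : x ≠ '_' := ha x (by simp)
    have h2 := ih (fun c hc => ha c (by simp [hc]))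
    simp at h2 ⊢
    simp [hx, h2.1, h2.2]

theorem tnid_drop_head (l : List Char) (c : Char) (r : List Char)
    (h : l.dropWhile (· ≠ '_') = c :: r) : c = '_' := by
  have hne : l.dropWhile (· ≠ '_') ≠ [] := by rw [h]; exact List.cons_ne_nil _ _
  have h2 := List.head_dropWhile_not (p := fun x => decide (x ≠ '_')) (l := l) hne
  have hh : (l.dropWhile (· ≠ '_')).head hne = c := by simp only [h, List.head_cons]
  rw [hh] at h2; simpa using h2

-- characterise A's endswith for a suffix '_'·tk with '_'-free tk, in terms of the reverse split
theorem tnid_endsw (l tk : List Char) (htk : '_' ∉ tk) :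
    PySem.Chars.endswith l ('_' :: tk) = true ↔
      (l.reverse.dropWhile (· ≠ '_') ≠ [] ∧ l.reverse.takeWhile (· ≠ '_') = tk.reverse) := by
  rw [PySem.Chars.endswith_iff]
  constructor
  · rintro ⟨u, hu⟩
    have hl : l.reverse = tk.reverse ++ '_' :: u.reverse := by
      rw [← hu]; simp
    have hfree : ∀ c ∈ tk.reverse, c ≠ '_' := by
      intro c hc; rintro rfl; exact htk (by simpa using hc)
    have h2 := tnid_tdw tk.reverse u.reverse hfree
    rw [hl]
    exact ⟨by rw [h2.2]; exact List.cons_ne_nil _ _, h2.1⟩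
  · rintro ⟨hne, ht⟩
    rcases hd : l.reverse.dropWhile (· ≠ '_') with _ | ⟨c, rest⟩
    · exact absurd hd hne
    · have hc : c = '_' := tnid_drop_head _ _ _ hd
      have hsplit : l.reverse = tk.reverse ++ '_' :: rest := by
        conv_lhs => rw [← List.takeWhile_append_dropWhile (p := fun x => decide (x ≠ '_')) (l := l.reverse)]
        rw [ht, hd, hc]
      refine ⟨rest.reverse, ?_⟩
      have := congrArg List.reverse hsplit
      simpa using this.symm

-- the generic loop/rpartition correspondence
theorem tnid_loop_eq (base : String) (toks : List (List Char)) (htk : ∀ tk ∈ toks, '_' ∉ tk) :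
    pyASuffixLoop base (toks.map (fun tk => String.ofList ('_' :: tk))) =
      (match base.toList.reverse.dropWhile (· ≠ '_') with
       | [] => base
       | _ :: rest =>
         if toks.contains ((base.toList.reverse.takeWhile (· ≠ '_')).reverse) then
           String.ofList rest.reverse
         else base) := by
  rcases hd : base.toList.reverse.dropWhile (· ≠ '_') with _ | ⟨c, rest⟩
  · -- no '_' in base: every suffix fails
    induction toks with
    | nil => simp [pyASuffixLoop]
    | cons tk tks ih =>
      have hfree : '_' ∉ tk := htk tk (by simp)
      have hes : PySem.Str.endswith base (String.ofList ('_' :: tk)) = false := by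
        rw [Bool.eq_false_iff]
        intro hcon
        simp only [PySem.Str.endswith_eq, String.toList_ofList] at hcon
        exact ((tnid_endsw base.toList tk hfree).mp hcon).1 hd
      simp only [List.map_cons, pyASuffixLoop, hes, Bool.false_eq_true, if_false]
      exact ih (fun t ht => htk t (by simp [ht]))
  · -- base splits as stem ++ '_' ++ token
    have hc : c = '_' := tnid_drop_head _ _ _ hd
    induction toks with
    | nil => simp [pyASuffixLoop]
    | cons tk tks ih =>
      have hfree : '_' ∉ tk := htk tk (by simp)
      by_cases htt : base.toList.reverse.takeWhile (· ≠ '_') = tk.reverse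
      · -- this suffix matches
        have hes : PySem.Str.endswith base (String.ofList ('_' :: tk)) = true := by
          simp only [PySem.Str.endswith_eq, String.toList_ofList]
          exact (tnid_endsw base.toList tk hfree).mpr ⟨by rw [hd]; exact List.cons_ne_nil _ _, htt⟩
        have hsplit : base.toList = rest.reverse ++ '_' :: tk := by
          have h1 : base.toList.reverse = tk.reverse ++ '_' :: rest := by
            conv_lhs => rw [← List.takeWhile_append_dropWhile (p := fun x => decide (x ≠ '_')) (l := base.toList.reverse)]
            rw [htt, hd, hc]
          have := congrArg List.reverse h1
          simpa using this
        have hlen : (String.ofList ('_' :: tk)).length = tk.length + 1 := by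
          simp [String.length_ofList]
        simp only [List.map_cons, pyASuffixLoop, hes, if_true, List.contains_cons]
        have hmem : ((base.toList.reverse.takeWhile (· ≠ '_')).reverse == tk) = true := by
          rw [beq_iff_eq, htt, List.reverse_reverse]
        have hslice : PySem.List.slice base.toList none (some (-((tk.length + 1 : Nat) : Int))) =
            base.toList.take (base.toList.length - (tk.length + 1)) :=
          PySem.List.slice_to_neg_natCast base.toList (tk.length + 1) (by omega)
        have htake : base.toList.take (base.toList.length - (tk.length + 1)) = rest.reverse := by
          rw [hsplit]
          have hlen2 : (rest.reverse ++ '_' :: tk).length = rest.length + (tk.length + 1) := by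
            simp only [List.length_append, List.length_reverse, List.length_cons]
          rw [hlen2]
          have : rest.length + (tk.length + 1) - (tk.length + 1) = rest.reverse.length := by
            simp
          rw [this, List.take_left]
        rw [hlen, hslice, htake]
        simp only [hmem, Bool.true_or, if_true]
      · -- this suffix fails, recurse
        have hes : PySem.Str.endswith base (String.ofList ('_' :: tk)) = false := by
          rw [Bool.eq_false_iff]
          intro hcon
          simp only [PySem.Str.endswith_eq, String.toList_ofList] at hcon
          exact htt ((tnid_endsw base.toList tk hfree).mp hcon).2
        have hne : ((base.toList.reverse.takeWhile (· ≠ '_')).reverse == tk) = false := by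
          rw [beq_eq_false_iff_ne]
          intro hcon
          exact htt (by rw [← hcon]; simp)
        simp only [List.map_cons, pyASuffixLoop, hes, Bool.false_eq_true, if_false]
        rw [ih (fun t ht => htk t (by simp [ht]))]
        simp only [List.contains_cons, hne, Bool.false_or]

-- string-level membership over literal token strings = char-level membership
theorem tnid_contains (ss : List String) (x : List Char) :
    ss.contains (String.ofList x) = (ss.map String.toList).contains x := by
  induction ss with
  | nil => simp
  | cons s ss ih =>
    simp only [List.contains_cons, List.map_cons, ih]
    congr 1
    by_cases h : String.ofList x = s
    · have : x = s.toList := (tnid_ofList_eq_iff x s).mp h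
      simp [h, this]
    · have : x ≠ s.toList := fun hc => h ((tnid_ofList_eq_iff x s).mpr hc)
      simp [h, this]

-- ===== VERDICT (by name: the statement is the Claim_ definition above) =====
theorem texture_node_id_from_nodedef_py_spec : Claim_equal_texture_node_id_from_nodedef_py := by
  intro nodedef_name _
  unfold Spec_texture_node_id_from_nodedef_py
  unfold texture_node_id_from_nodedef_py texture_node_id_from_nodedef_py_alt
  have hbase : PySem.List.slice nodedef_name.toList (some (3 : Int)) none = nodedef_name.toList.drop 3 := by
    have := PySem.List.slice_from_natCast nodedef_name.toList 3
    simpa using this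
  rw [hbase]
  set base := (if PySem.Str.startswith nodedef_name "ND_" then String.ofList (nodedef_name.toList.drop 3) else nodedef_name) with hb
  have hmap : (["_color3", "_color4", "_vector2", "_vector3", "_vector4", "_float"] : List String) =
      ([['c','o','l','o','r','3'], ['c','o','l','o','r','4'], ['v','e','c','t','o','r','2'],
        ['v','e','c','t','o','r','3'], ['v','e','c','t','o','r','4'], ['f','l','o','a','t']] : List (List Char)).map
        (fun tk => String.ofList ('_' :: tk)) := by decide
  rw [hmap, tnid_loop_eq base _ (by decide)]
  simp only [pyRPartitionUnderscore]
  rcases hd : base.toList.reverse.dropWhile (· ≠ '_') with _ | ⟨c, rest⟩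
  · simp
  · simp only []
    rw [tnid_contains]
    have hts : (pySuffixTokens.map String.toList) =
        ([['c','o','l','o','r','3'], ['c','o','l','o','r','4'], ['v','e','c','t','o','r','2'],
          ['v','e','c','t','o','r','3'], ['v','e','c','t','o','r','4'], ['f','l','o','a','t']] : List (List Char)) := by
      decide
    rw [hts]
    simp [Bool.true_and]
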